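-- pv_equiv track=rewrite | github.com/akshar-23/stwfc | src/train.py | train_3D
-- ===== SOURCE A (Python) =====
-- def train_3D(solutions, tile_size=1):
--     # For each change, track also how neighbors change.
--     # Then in generation, can select which neighbor to move to to gen next.
--     transitions = {}
--     for soln in solutions:
--         I = len(soln[0])
--         J = len(soln[0][0])
--         for i in range(I):
--             for j in range(J):
--                 # For each tile in space
--                 tile_prev = None
--                 for t in range(len(soln)):
--                     # For each timestep
--                     tile_curr = soln[t][i][j]
--                     if tile_curr not in transitions:
--                         transitions[tile_curr] = {
--                             "prev": [],
--                             "next": [],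
--                         }
--                     if tile_curr != tile_prev:
--                         # Add the tile at the previous timestep to the list of tiles that can precede this tile.
--                         transitions[tile_curr]["prev"].append(tile_prev)
--                         if tile_prev is not None:
--                             # Add this tile to the list of tiles that can follow its preceding tile.
--                             transitions[tile_prev]["next"].append(tile_curr)
--                     tile_prev = tile_curr
--                     if t == len(soln) - 1:
--                         # This is the last step in the solution.
--                         transitions[tile_curr]["next"].append(None)
--
--     return transitions
-- ===== SOURCE B (Python) =====
-- def train_3D(solutions, tile_size=1):
--     from itertools import groupby
--     # Phase 1: for every spatial cell, collapse its time sequence into run heads.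
--     columns = []
--     for soln in solutions:
--         I = len(soln[0])
--         J = len(soln[0][0])
--         for i in range(I):
--             for j in range(J):
--                 columns.append([k for k, _ in groupby(layer[i][j] for layer in soln)])
--     # Phase 2: build the prev/next adjacency from each column's run boundaries.
--     transitions = {}
--     for runs in columns:
--         for prev, curr in zip([None] + runs[:-1], runs):
--             e = transitions.setdefault(curr, {"prev": [], "next": []})
--             e["prev"].append(prev)
--             if prev is not None:
--                 transitions[prev]["next"].append(curr)
--         transitions[runs[-1]]["next"].append(None)
--     return transitions
-- ===== Notes on version B (the rewrite author's own statement) =====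
-- stated objective: alternative
-- what changed: Replaces A's single stateful per-timestep scan (equality test and last-index flag inside one nested loop) by two staged passes: first collect, for every spatial cell across all solutions, the run heads of its time sequence via groupby into one flat list; then build the prev/next adjacency by folding over each run list's zipped (prev, curr) boundary pairs, appending the trailing None after each walk.
import Mathlib
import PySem

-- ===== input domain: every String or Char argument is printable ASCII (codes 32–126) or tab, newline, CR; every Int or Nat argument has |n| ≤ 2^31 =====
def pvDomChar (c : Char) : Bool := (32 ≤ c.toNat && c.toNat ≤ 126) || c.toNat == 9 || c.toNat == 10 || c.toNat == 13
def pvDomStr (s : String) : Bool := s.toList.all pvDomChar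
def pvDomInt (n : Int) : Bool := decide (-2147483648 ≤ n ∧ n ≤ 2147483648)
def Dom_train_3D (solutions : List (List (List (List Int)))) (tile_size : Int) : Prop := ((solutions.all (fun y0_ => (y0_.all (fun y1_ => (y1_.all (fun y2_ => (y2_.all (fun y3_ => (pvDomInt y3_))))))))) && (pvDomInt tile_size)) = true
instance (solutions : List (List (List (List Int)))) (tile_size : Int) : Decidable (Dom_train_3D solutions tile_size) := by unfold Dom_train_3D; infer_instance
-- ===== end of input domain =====

-- B replaces A's single stateful per-timestep scan by two staged passes — first gather every
-- cell's run-head list (groupby) into one flat list, then fold each run list's zipped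
-- (prev, curr) boundary pairs into the dict — same cost, different decomposition (alternative).

-- Shared dictionary primitives (both Pythons perform these exact dict mutations):
abbrev pvTrans : Type := PySem.Dict Int (PySem.Dict String (List (Option Int)))

-- `transitions[k]["prev"].append(v)` — the key is present at every call site, so
-- modify-with-default is exact there (Python would raise KeyError on a missing key).
def pvAppendPrev (d : pvTrans) (k : Int) (v : Option Int) : pvTrans :=
  d.modify k PySem.Dict.empty (fun e => e.modify "prev" [] (fun l => l ++ [v]))

-- `transitions[k]["next"].append(v)`
def pvAppendNext (d : pvTrans) (k : Int) (v : Option Int) : pvTrans :=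
  d.modify k PySem.Dict.empty (fun e => e.modify "next" [] (fun l => l ++ [v]))

-- A's `if tile not in transitions: transitions[tile] = {...}` and B's
-- `transitions.setdefault(curr, {...})` have this same dict effect
def pvEnsure (d : pvTrans) (k : Int) : pvTrans :=
  if d.contains k then d else d.insert k (PySem.Dict.ofList [("prev", []), ("next", [])])

-- ===== PORT A =====
-- `soln[t][i][j]`; the defaults are only reached where Python raises IndexError (outside Pre_)
def pvGetTile (soln : List (List (List Int))) (t i j : Int) : Int :=
  PySem.List.pyGetD (PySem.List.pyGetD (PySem.List.pyGetD soln t []) i []) j 0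

-- body of A's `for t in range(len(soln))` loop; state = (transitions, tile_prev)
def pvBodyA (soln : List (List (List Int))) (i j : Int)
    (st : pvTrans × Option Int) (t : Int) : pvTrans × Option Int :=
  let tile_curr := pvGetTile soln t i j
  let d := pvEnsure st.1 tile_curr
  let d := if some tile_curr ≠ st.2 then
      let d := pvAppendPrev d tile_curr st.2
      match st.2 with
      | some q => pvAppendNext d q (some tile_curr)
      | none => d
    else d
  let d := if t = PySem.List.len soln - 1 then pvAppendNext d tile_curr none else d
  (d, some tile_curr)

-- A's loop nest building the transitions dict
def pvDictA (solutions : List (List (List (List Int)))) : pvTrans :=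
  solutions.foldl (fun transitions soln =>
      let I := PySem.List.len (PySem.List.pyGetD soln 0 [])
      let J := PySem.List.len (PySem.List.pyGetD (PySem.List.pyGetD soln 0 []) 0 [])
      (PySem.List.pyRange 0 I 1).foldl (fun transitions i =>
        (PySem.List.pyRange 0 J 1).foldl (fun transitions j =>
          ((PySem.List.pyRange 0 (PySem.List.len soln) 1).foldl
            (pvBodyA soln i j) (transitions, none)).1) transitions) transitions)
    PySem.Dict.empty

def train_3D (solutions : List (List (List (List Int)))) (tile_size : Int) :
    List (Int × List (String × List (Option Int))) :=
  (pvDictA solutions).items.map (fun p => (p.1, p.2.items))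

-- ===== PORT B =====
-- `[k for k, _ in groupby(...)]`: the head of each maximal run of equal values
def pvGroupHeads : List Int → List Int
  | [] => []
  | x :: rest => x :: pvGroupHeads (rest.dropWhile (fun y => y == x))
termination_by l => l.length
decreasing_by simpa using Nat.lt_succ_of_le (List.length_dropWhile_le _ _)

-- Phase 1: the run-head list of every spatial cell, in traversal order
def pvColumnsB (solutions : List (List (List (List Int)))) : List (List Int) :=
  solutions.flatMap (fun soln =>
    let I := PySem.List.len (PySem.List.pyGetD soln 0 [])
    let J := PySem.List.len (PySem.List.pyGetD (PySem.List.pyGetD soln 0 []) 0 [])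
    (PySem.List.pyRange 0 I 1).flatMap (fun i =>
      (PySem.List.pyRange 0 J 1).map (fun j =>
        pvGroupHeads (soln.map (fun layer =>
          PySem.List.pyGetD (PySem.List.pyGetD layer i []) j 0)))))

-- body of B's `for prev, curr in zip([None] + runs[:-1], runs)` loop
def pvPairBody (d : pvTrans) (pc : Option Int × Int) : pvTrans :=
  let d := pvAppendPrev (pvEnsure d pc.2) pc.2 pc.1
  match pc.1 with
  | some q => pvAppendNext d q (some pc.2)
  | none => d

-- Phase 2 for one run list; `runs[-1]` raises on empty runs (outside Pre_), ported as the
-- identity there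
def pvColB (d : pvTrans) (runs : List Int) : pvTrans :=
  let d := ((none :: runs.dropLast.map some).zip runs).foldl pvPairBody d
  match runs.getLast? with
  | some last => pvAppendNext d last none
  | none => d

def train_3D_alt (solutions : List (List (List (List Int)))) (tile_size : Int) :
    List (Int × List (String × List (Option Int))) :=
  ((pvColumnsB solutions).foldl pvColB PySem.Dict.empty).items.map (fun p => (p.1, p.2.items))

-- ===== PRECONDITION & SPEC =====
-- Pre_ = exactly the inputs on which Python A returns (elsewhere it raises IndexError):
-- every solution is nonempty with a nonempty first layer, and — when the first row is
-- nonempty, i.e. J > 0 — every layer has at least I rows each at least J wide.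
def Pre_train_3D (solutions : List (List (List (List Int)))) (tile_size : Int) : Prop :=
  ∀ soln ∈ solutions, soln ≠ [] ∧ soln.headD [] ≠ [] ∧
    (((soln.headD []).headD []).length ≠ 0 →
      ∀ layer ∈ soln, (soln.headD []).length ≤ layer.length ∧
        ∀ row ∈ layer.take (soln.headD []).length,
          ((soln.headD []).headD []).length ≤ row.length)
instance (solutions : List (List (List (List Int)))) (tile_size : Int) : Decidable (Pre_train_3D solutions tile_size) := by unfold Pre_train_3D; infer_instance

def pvWitness_train_3D : List (List (List (List Int))) × Int :=
  ([[[[1, 2], [2, 2]], [[2, 2], [0, 2]]]], 1)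

def Spec_train_3D (solutions : List (List (List (List Int)))) (tile_size : Int) (out : List (Int × List (String × List (Option Int)))) : Prop := out = train_3D_alt solutions tile_size
instance (solutions : List (List (List (List Int)))) (tile_size : Int) (out : List (Int × List (String × List (Option Int)))) : Decidable (Spec_train_3D solutions tile_size out) := by unfold Spec_train_3D; infer_instance

-- ===== CLAIM (what is proved, stated in full; the proofs are below) =====
def Claim_equal_train_3D : Prop := ∀ (solutions : List (List (List (List Int)))) (tile_size : Int), Dom_train_3D solutions tile_size → Pre_train_3D solutions tile_size → Spec_train_3D solutions tile_size (train_3D solutions tile_size)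

-- ===== LEMMAS AND PROOFS =====

-- A's timestep step with the last-index flag stripped (what A does at a non-final t)
def pvStep (st : pvTrans × Option Int) (x : Int) : pvTrans × Option Int :=
  let d := pvEnsure st.1 x
  let d := if some x ≠ st.2 then
      let d := pvAppendPrev d x st.2
      match st.2 with
      | some q => pvAppendNext d q (some x)
      | none => d
    else d
  (d, some x)

-- the stateful form of B's pair walk (prev carried in the state)
def pvBodyB (st : pvTrans × Option Int) (tile : Int) : pvTrans × Option Int :=
  let d := pvEnsure st.1 tile
  let d := pvAppendPrev d tile st.2
  let d := match st.2 with
    | some q => pvAppendNext d q (some tile)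
    | none => d
  (d, some tile)

-- collapse a sequence into runs, given the value preceding it
def pvCollapse : Option Int → List Int → List Int
  | _, [] => []
  | p, x :: rest => if p = some x then pvCollapse p rest else x :: pvCollapse (some x) rest

theorem pvCollapse_cons_eq (p : Option Int) (x : Int) (rest : List Int) (h : p = some x) :
    pvCollapse p (x :: rest) = pvCollapse p rest := by
  simp [pvCollapse, h]

theorem pvCollapse_cons_ne (p : Option Int) (x : Int) (rest : List Int) (h : p ≠ some x) :
    pvCollapse p (x :: rest) = x :: pvCollapse (some x) rest := by
  simp [pvCollapse, h]

-- pvGroupHeads computes pvCollapse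
theorem pvGroupHeads_dropWhile : ∀ (seq : List Int) (x : Int),
    pvGroupHeads (seq.dropWhile (fun y => y == x)) = pvCollapse (some x) seq := by
  intro seq
  induction seq with
  | nil => intro x; simp [pvGroupHeads, pvCollapse]
  | cons y ys ih =>
    intro x
    by_cases h : y = x
    · subst h
      rw [pvCollapse_cons_eq _ y ys rfl,
        show (y :: ys).dropWhile (fun z => z == y) = ys.dropWhile (fun z => z == y) by
          simp [List.dropWhile_cons]]
      exact ih y
    · have hdw : (y :: ys).dropWhile (fun z => z == x) = y :: ys := by
        simp [List.dropWhile_cons, h]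
      rw [hdw, pvCollapse_cons_ne _ y ys (by simp; exact fun e => h e.symm)]
      simp only [pvGroupHeads]
      rw [ih y]

theorem pvGroupHeads_eq_collapse (seq : List Int) :
    pvGroupHeads seq = pvCollapse none seq := by
  cases seq with
  | nil => simp [pvGroupHeads, pvCollapse]
  | cons x rest =>
    rw [pvCollapse_cons_ne none x rest (by simp)]
    simp only [pvGroupHeads]
    rw [pvGroupHeads_dropWhile rest x]

-- B's zipped pair walk equals the stateful walk
theorem pvPairs_fold : ∀ (runs : List Int) (d : pvTrans) (p : Option Int),
    ((p :: runs.dropLast.map some).zip runs).foldl pvPairBody d =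
      (runs.foldl pvBodyB (d, p)).1 := by
  intro runs
  induction runs with
  | nil => intro d p; rfl
  | cons x rest ih =>
    intro d p
    cases rest with
    | nil => rfl
    | cons r rs =>
      have hdl : (x :: r :: rs).dropLast = x :: (r :: rs).dropLast := rfl
      rw [hdl]
      show ((r :: rs).dropLast.map some |>.cons (some x) |>.zip (r :: rs)).foldl pvPairBody
            (pvPairBody d (p, x)) = _
      have hbody : pvPairBody d (p, x) = (pvBodyB (d, p) x).1 := rfl
      rw [hbody, ih ((pvBodyB (d, p) x).1) (some x)]
      rfl

def pvInv (st : pvTrans × Option Int) : Prop :=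
  ∀ q, st.2 = some q → st.1.contains q = true

theorem pvEnsure_contains (d : pvTrans) (k : Int) : (pvEnsure d k).contains k = true := by
  unfold pvEnsure; split
  · assumption
  · exact PySem.Dict.contains_insert_self d k _

theorem pvAppendPrev_contains (d : pvTrans) (k : Int) (v : Option Int) (k' : Int)
    (h : d.contains k' = true) : (pvAppendPrev d k v).contains k' = true := by
  unfold pvAppendPrev; rw [PySem.Dict.contains_modify]; simp [h]

theorem pvAppendNext_contains (d : pvTrans) (k : Int) (v : Option Int) (k' : Int)
    (h : d.contains k' = true) : (pvAppendNext d k v).contains k' = true := by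
  unfold pvAppendNext; rw [PySem.Dict.contains_modify]; simp [h]

theorem pvBodyB_inv (st : pvTrans × Option Int) (x : Int) : pvInv (pvBodyB st x) := by
  obtain ⟨d0, p0⟩ := st
  intro q hq
  cases hq
  cases p0 with
  | none => exact pvAppendPrev_contains (pvEnsure d0 x) x none x (pvEnsure_contains d0 x)
  | some p =>
    exact pvAppendNext_contains _ p (some x) x
      (pvAppendPrev_contains (pvEnsure d0 x) x (some p) x (pvEnsure_contains d0 x))

theorem pvStep_eq_of_ne (st : pvTrans × Option Int) (x : Int) (h : some x ≠ st.2) :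
    pvStep st x = pvBodyB st x := by
  unfold pvStep pvBodyB
  simp [h]

theorem pvStep_eq_of_eq (st : pvTrans × Option Int) (x : Int) (h : st.2 = some x)
    (hinv : pvInv st) : pvStep st x = st := by
  obtain ⟨d0, p0⟩ := st
  have hc : d0.contains x = true := hinv x h
  simp only at h
  subst h
  unfold pvStep
  simp [pvEnsure, hc]

-- A's flagless loop over the sequence equals the stateful walk over its runs
theorem pvLoop_eq_walk : ∀ (seq : List Int) (st : pvTrans × Option Int), pvInv st →
    seq.foldl pvStep st = (pvCollapse st.2 seq).foldl pvBodyB st := by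
  intro seq
  induction seq with
  | nil => intro st _; simp [pvCollapse]
  | cons x rest ih =>
    intro st hinv
    by_cases h : st.2 = some x
    · rw [pvCollapse_cons_eq st.2 x rest h]
      simp only [List.foldl_cons, pvStep_eq_of_eq st x h hinv]
      exact ih st hinv
    · have hne : some x ≠ st.2 := by intro hx; exact h hx.symm
      rw [pvCollapse_cons_ne st.2 x rest h]
      simp only [List.foldl_cons, pvStep_eq_of_ne st x hne]
      have h2 : (pvBodyB st x).2 = some x := rfl
      rw [ih (pvBodyB st x) (pvBodyB_inv st x), h2]

theorem pvCollapse_nil_all : ∀ (seq : List Int) (p : Option Int),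
    pvCollapse p seq = [] → ∀ y ∈ seq, some y = p := by
  intro seq
  induction seq with
  | nil => simp
  | cons x rest ih =>
    intro p hc y hy
    by_cases hpx : p = some x
    · rw [pvCollapse_cons_eq p x rest hpx] at hc
      rcases List.mem_cons.mp hy with rfl | hy'
      · exact hpx.symm
      · exact ih p hc y hy'
    · rw [pvCollapse_cons_ne p x rest hpx] at hc
      simp at hc

-- collapsing preserves the last element (when the result is nonempty)
theorem pvCollapse_getLast? : ∀ (seq : List Int) (p : Option Int),
    pvCollapse p seq = [] ∨ (pvCollapse p seq).getLast? = seq.getLast? := by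
  intro seq
  induction seq with
  | nil => intro p; left; rfl
  | cons x rest ih =>
    intro p
    by_cases hpx : p = some x
    · rw [pvCollapse_cons_eq p x rest hpx]
      rcases ih p with h | h
      · left; exact h
      · cases rest with
        | nil => left; exact List.eq_nil_of_length_eq_zero (by
            rcases h0 : pvCollapse p [] with _ | _ <;> simp [pvCollapse] at h0 ⊢)
        | cons r rs => right; rw [h, List.getLast?_cons_cons]
    · rw [pvCollapse_cons_ne p x rest hpx]
      right
      cases hc : pvCollapse (some x) rest with
      | nil =>
        have hall := pvCollapse_nil_all rest (some x) hc
        cases rest with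
        | nil => rfl
        | cons r rs =>
          have hmem : (r :: rs).getLast (by simp) ∈ r :: rs := List.getLast_mem _
          have hx : some ((r :: rs).getLast (by simp)) = some x := hall _ hmem
          have hlast : (r :: rs).getLast? = some x := by
            rw [List.getLast?_eq_some_getLast (by simp : (r :: rs) ≠ [])]; exact hx
          rw [List.getLast?_cons_cons, hlast]
          simp
      | cons c cs =>
        have hrest : rest ≠ [] := by
          intro he; rw [he] at hc; simp [pvCollapse] at hc
        rcases ih (some x) with h | h
        · rw [hc] at h; simp at h
        · cases rest with
          | nil => exact absurd rfl hrest
          | cons r rs =>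
            rw [List.getLast?_cons_cons, List.getLast?_cons_cons, ← hc, h]

-- non-final timesteps of A do pvStep; the final one appends None afterwards
theorem pvBodyA_eq_step (soln : List (List (List Int))) (i j : Int)
    (st : pvTrans × Option Int) (t : Int) (h : t ≠ PySem.List.len soln - 1) :
    pvBodyA soln i j st t = pvStep st (pvGetTile soln t i j) := by
  unfold pvBodyA pvStep
  simp only [PySem.List.len_eq] at h
  simp [h]

theorem pvBodyA_eq_last (soln : List (List (List Int))) (i j : Int)
    (st : pvTrans × Option Int) (t : Int) (h : t = PySem.List.len soln - 1) :
    (pvBodyA soln i j st t).1 =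
      pvAppendNext (pvStep st (pvGetTile soln t i j)).1 (pvGetTile soln t i j) none := by
  unfold pvBodyA pvStep
  simp only [PySem.List.len_eq] at h
  simp [h]

-- for one column, A's flagged timestep loop equals B's runs-then-pairs pass
theorem pvInner_eq (soln : List (List (List Int))) (i j : Int) (d : pvTrans) :
    ((PySem.List.pyRange 0 (PySem.List.len soln) 1).foldl (pvBodyA soln i j) (d, none)).1 =
    pvColB d (pvGroupHeads (soln.map (fun layer =>
      PySem.List.pyGetD (PySem.List.pyGetD layer i []) j 0))) := by
  cases soln with
  | nil => simp [PySem.List.len, PySem.List.pyRange_one_eq_nil, pvGroupHeads, pvColB]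
  | cons l0 ls =>
    set soln := l0 :: ls with hsoln
    set T : Int := PySem.List.len soln with hT
    have hT1 : 1 ≤ T := by simp only [hT, PySem.List.len_eq, hsoln, List.length_cons]; omega
    have hsplit : PySem.List.pyRange 0 T 1 = PySem.List.pyRange 0 (T - 1) 1 ++ [T - 1] := by
      have := PySem.List.pyRange_one_succ_right (a := 0) (b := T - 1) (by omega)
      rw [show T - 1 + 1 = T by ring] at this
      exact this
    set g : Int → Int := fun t => pvGetTile soln t i j with hg
    -- LHS: peel the final timestep, replace the flagged body by pvStep on the prefix
    have hprefix : ∀ (st0 : pvTrans × Option Int),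
        (PySem.List.pyRange 0 (T - 1) 1).foldl (pvBodyA soln i j) st0 =
        ((PySem.List.pyRange 0 (T - 1) 1).map g).foldl pvStep st0 := by
      intro st0
      rw [List.foldl_map]
      exact PySem.List.foldl_congr_mem _ _ _ _ (fun acc x hx => by
        have hxlt : x < T - 1 := (PySem.List.mem_pyRange_one.mp hx).2
        exact pvBodyA_eq_step soln i j acc x (by omega))
    have hseq : (PySem.List.pyRange 0 T 1).map g =
        ((PySem.List.pyRange 0 (T - 1) 1).map g) ++ [g (T - 1)] := by
      rw [hsplit, List.map_append]; rfl
    set seq' : List Int := (PySem.List.pyRange 0 (T - 1) 1).map g with hseq'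
    have hL : ((PySem.List.pyRange 0 T 1).foldl (pvBodyA soln i j) (d, none)).1 =
        pvAppendNext (pvStep (seq'.foldl pvStep (d, none)) (g (T - 1))).1 (g (T - 1)) none := by
      rw [hsplit, List.foldl_append, hprefix]
      exact pvBodyA_eq_last soln i j _ (T - 1) rfl
    rw [hL]
    -- RHS: the column's sequence via map, then its runs via pvCollapse
    set seq : List Int := (PySem.List.pyRange 0 T 1).map g with hseqdef
    have hseq_map : soln.map (fun layer =>
        PySem.List.pyGetD (PySem.List.pyGetD layer i []) j 0) = seq := by
      rw [hseqdef]
      calc soln.map (fun layer => PySem.List.pyGetD (PySem.List.pyGetD layer i []) j 0)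
          = ((PySem.List.pyRange 0 T 1).map (fun t => PySem.List.pyGetD soln t [])).map
              (fun layer => PySem.List.pyGetD (PySem.List.pyGetD layer i []) j 0) := by
            rw [hT, PySem.List.map_pyGetD_pyRange_zero]
        _ = (PySem.List.pyRange 0 T 1).map g := by rw [List.map_map]; rfl
    rw [hseq_map, pvGroupHeads_eq_collapse]
    have hseqcons : ∃ y ys, seq = y :: ys := by
      have : PySem.List.pyRange 0 T 1 = 0 :: PySem.List.pyRange 1 T 1 := by
        have := PySem.List.pyRange_one_cons (a := 0) (b := T) (by omega)
        simpa using this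
      exact ⟨g 0, _, by rw [hseqdef, this]; rfl⟩
    obtain ⟨y, ys, hys⟩ := hseqcons
    have hcol_ne : pvCollapse none seq ≠ [] := by
      rw [hys]; unfold pvCollapse; simp
    have hcol_last : (pvCollapse none seq).getLast? = some (g (T - 1)) := by
      rcases pvCollapse_getLast? seq none with h | h
      · exact absurd h hcol_ne
      · rw [h, hseq, List.getLast?_concat]
    have hwalk : (pvCollapse none seq).foldl pvBodyB (d, none) = seq.foldl pvStep (d, none) :=
      (pvLoop_eq_walk seq (d, none) (by intro q hq; simp at hq)).symm
    unfold pvColB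
    rw [pvPairs_fold (pvCollapse none seq) d none, hcol_last]
    rw [hwalk, hseq, List.foldl_append]
    rfl

-- foldl over a flatMap is the nested foldl
theorem pvFoldlFlatMap {α β γ : Type} (l : List α) (g : α → List β) (f : γ → β → γ)
    (init : γ) :
    (l.flatMap g).foldl f init = l.foldl (fun acc x => (g x).foldl f acc) init := by
  induction l generalizing init with
  | nil => rfl
  | cons a as ih => simp [List.flatMap_cons, List.foldl_append, ih]

theorem pvDict_eq (solutions : List (List (List (List Int)))) :
    pvDictA solutions = (pvColumnsB solutions).foldl pvColB PySem.Dict.empty := by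
  unfold pvDictA pvColumnsB
  rw [pvFoldlFlatMap]
  apply PySem.List.foldl_congr_mem
  intro trans soln _
  dsimp only
  rw [pvFoldlFlatMap]
  apply PySem.List.foldl_congr_mem
  intro d i _
  rw [List.foldl_map]
  apply PySem.List.foldl_congr_mem
  intro d' j _
  exact pvInner_eq soln i j d'

theorem pv_ports_eq (solutions : List (List (List (List Int)))) (tile_size : Int) :
    train_3D solutions tile_size = train_3D_alt solutions tile_size := by
  unfold train_3D train_3D_alt
  rw [pvDict_eq]

-- ===== VERDICT (by name: the statement is the Claim_ definition above) =====
theorem train_3D_spec : Claim_equal_train_3D := by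
  intro solutions tile_size _ _
  unfold Spec_train_3D
  exact pv_ports_eq solutions tile_size
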